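-- pv_equiv track=rewrite | github.com/ilya-smut/Cracking-Codes-with-Python-AIStewart-tasks | make_word_patterns.py | get_word_pattern
-- ===== SOURCE A (Python) =====
-- def get_word_pattern(word):
--     word = word.upper()
--     letters_and_indexes = {}
--     pattern = ''
--     index = 0
--     for letter in word:
--         if letter not in letters_and_indexes:
--             letters_and_indexes[letter] = index
--             index += 1
--         pattern += f'{str(letters_and_indexes[letter])}.'
--     return pattern[:-1]
-- ===== SOURCE B (Python) =====
-- def get_word_pattern(word):
--     word = word.upper()
--     # the pattern digit of a letter is the number of distinct letters that
--     # first appear strictly before its own first occurrence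
--     return '.'.join(str(len(set(word[:word.index(ch)]))) for ch in word)
-- ===== Notes on version B (the rewrite author's own statement) =====
-- stated objective: alternative
-- what changed: Replaces A's single interleaved loop maintaining a letter-to-index dict, a counter and a growing dot-terminated string (trimmed with a final slice) by a direct closed-form characterisation: each letter's pattern digit is len(set(word[:word.index(ch)])), the number of distinct letters before its first occurrence, and the digits are dot-joined; no table of assigned indices is kept at all (trades speed for a one-liner).
import Mathlib
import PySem

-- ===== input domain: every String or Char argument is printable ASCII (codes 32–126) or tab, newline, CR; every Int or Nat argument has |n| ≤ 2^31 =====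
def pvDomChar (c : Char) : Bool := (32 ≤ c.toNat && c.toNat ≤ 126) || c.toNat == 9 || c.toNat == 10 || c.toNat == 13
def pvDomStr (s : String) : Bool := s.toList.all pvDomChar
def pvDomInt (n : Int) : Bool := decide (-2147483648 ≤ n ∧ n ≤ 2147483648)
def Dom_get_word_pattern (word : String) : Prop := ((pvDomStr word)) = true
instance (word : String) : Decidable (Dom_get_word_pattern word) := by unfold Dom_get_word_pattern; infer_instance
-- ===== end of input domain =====

-- B drops A's dict+counter+string loop entirely: each letter's pattern digit is computed
-- directly as the number of distinct letters in the prefix before its first occurrence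
-- (alternative closed-form characterisation; quadratic, not faster).


-- ===== PORT A =====
-- one loop step of A: maybe record the letter's fresh index, then append "<idx>." to the pattern
def pvStepA (s : PySem.Dict Char Int × List Char × Int) (letter : Char) :
    PySem.Dict Char Int × List Char × Int :=
  let d := if s.1.contains letter then s.1 else s.1.insert letter s.2.2
  let index := if s.1.contains letter then s.2.2 else s.2.2 + 1
  -- d[letter]: the key is always present here (just inserted if it was new), so getD's default is never used
  (d, s.2.1 ++ PySem.Int.toChars (d.getD letter 0) ++ ['.'], index)

def get_word_pattern (word : String) : String :=
  -- pattern[:-1] is the final slice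
  String.ofList (PySem.List.slice
    (((PySem.Str.upper word).toList).foldl pvStepA (PySem.Dict.empty, [], 0)).2.1
    none (some (-1)))

-- ===== PORT B =====
-- Source B: '.'.join(str(len(set(word[:word.index(ch)]))) for ch in word) after upper().
-- word.index(ch): ch always occurs in word here, so the Option default 0 is never used.
def get_word_pattern_alt (word : String) : String :=
  PySem.Str.join "."
    (((PySem.Str.upper word).toList).map (fun c =>
      PySem.Int.toStr (PySem.Set.len (PySem.Set.ofList
        (PySem.List.slice ((PySem.Str.upper word).toList) none
          (some (((PySem.List.index? ((PySem.Str.upper word).toList) c).getD 0 : Nat) : Int)))))))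

-- ===== PRECONDITION & SPEC =====
def Spec_get_word_pattern (word : String) (out : String) : Prop := out = get_word_pattern_alt word
instance (word : String) (out : String) : Decidable (Spec_get_word_pattern word out) := by unfold Spec_get_word_pattern; infer_instance

-- ===== CLAIM (what is proved, stated in full; the proofs are below) =====
def Claim_equal_get_word_pattern : Prop := ∀ (word : String), Dom_get_word_pattern word → Spec_get_word_pattern word (get_word_pattern word)

-- ===== LEMMAS AND PROOFS =====

-- the distinct-letter table A's dict effectively enumerates, one step
def pvDistStep (acc : List Char) (c : Char) : List Char :=
  if c ∈ acc then acc else acc ++ [c]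

-- the chunk A emits for letter c relative to a letters table L
def pvChunk (L : List Char) (c : Char) : List Char :=
  PySem.Int.toChars (((PySem.List.index? L c).getD 0 : Nat) : Int)

-- what A's pattern accumulates over l, tracking the letters table as it grows
def pvBody : List Char → List Char → List Char
  | _, [] => []
  | L, c :: l => pvChunk (pvDistStep L c) c ++ ['.'] ++ pvBody (pvDistStep L c) l

lemma pvDist_prefix (l L : List Char) : ∃ t, l.foldl pvDistStep L = L ++ t := by
  induction l generalizing L with
  | nil => exact ⟨[], by simp⟩
  | cons c l ih =>
    simp only [List.foldl_cons]
    obtain ⟨t, ht⟩ := ih (pvDistStep L c)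
    by_cases h : c ∈ L
    · exact ⟨t, by rw [show pvDistStep L c = L from by simp [pvDistStep, h]] at ht ⊢; exact ht⟩
    · refine ⟨c :: t, ?_⟩
      rw [show pvDistStep L c = L ++ [c] from by simp [pvDistStep, h]] at ht ⊢
      rw [ht]; simp

lemma pvBody_eq_flatten (l : List Char) : ∀ L,
    pvBody L l =
      ((l.map (fun c => pvChunk (l.foldl pvDistStep L) c)).map (· ++ ['.'])).flatten := by
  induction l with
  | nil => intro L; simp [pvBody]
  | cons c l ih =>
    intro L
    have hc : c ∈ pvDistStep L c := by
      unfold pvDistStep; split <;> simp_all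
    have hidx : PySem.List.index? (l.foldl pvDistStep (pvDistStep L c)) c
        = PySem.List.index? (pvDistStep L c) c := by
      obtain ⟨t, ht⟩ := pvDist_prefix l (pvDistStep L c)
      rw [ht, PySem.List.index?_append_of_mem t hc]
    simp only [pvBody, List.foldl_cons, ih (pvDistStep L c), List.map_cons, List.flatten_cons,
      pvChunk, hidx, List.append_assoc]

-- A's loop invariant: the dict is exactly "position in the letters table L"
lemma pvFoldA (l : List Char) : ∀ (L : List Char) (d : PySem.Dict Char Int) (pat : List Char),
    (∀ c, d.get? c = (PySem.List.index? L c).map (fun n => ((n : Nat) : Int))) →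
    (l.foldl pvStepA (d, pat, (L.length : Int))).2.1 = pat ++ pvBody L l := by
  induction l with
  | nil => intro L d pat _; simp [pvBody]
  | cons c l ih =>
    intro L d pat hinv
    have hcont : d.contains c = (PySem.List.index? L c).isSome := by
      rw [PySem.Dict.contains_eq_isSome_get?, hinv c, Option.isSome_map]
    by_cases hmem : c ∈ L
    · -- letter already seen: dict and counter are unchanged
      have hL' : pvDistStep L c = L := by unfold pvDistStep; simp [hmem]
      obtain ⟨k, hk⟩ := Option.isSome_iff_exists.mp
        ((PySem.List.index?_isSome_iff L c).mpr hmem)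
      have hstep : pvStepA (d, pat, (L.length : Int)) c
          = (d, pat ++ PySem.Int.toChars ((k : Nat) : Int) ++ ['.'], (L.length : Int)) := by
        unfold pvStepA
        rw [hcont, hk]
        simp [PySem.Dict.getD_eq_get?_getD, hinv c,
          show List.idxOf? c L = some k from by rw [← PySem.List.index?_eq_idxOf?]; exact hk]
      rw [List.foldl_cons, hstep, ih L d _ hinv]
      simp only [pvBody, hL', pvChunk, hk]
      simp
    · -- fresh letter: insert it at index L.length
      have hnone : PySem.List.index? L c = none := (PySem.List.index?_eq_none_iff L c).mpr hmem
      have hL' : pvDistStep L c = L ++ [c] := by unfold pvDistStep; simp [hmem]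
      have hinv' : ∀ x, (d.insert c (L.length : Int)).get? x
          = (PySem.List.index? (L ++ [c]) x).map (fun n => ((n : Nat) : Int)) := by
        intro x
        by_cases hx : x = c
        · rw [hx, PySem.Dict.get?_insert_self, PySem.List.index?_append_singleton_self L c hmem]
          simp
        · rw [PySem.Dict.get?_insert_of_ne d _ hx, hinv x]
          by_cases hxL : x ∈ L
          · rw [PySem.List.index?_append_of_mem [c] hxL]
          · rw [(PySem.List.index?_eq_none_iff L x).mpr hxL,
              (PySem.List.index?_eq_none_iff (L ++ [c]) x).mpr (by simp [hxL, hx])]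
      have hstep : pvStepA (d, pat, (L.length : Int)) c
          = (d.insert c (L.length : Int),
             pat ++ PySem.Int.toChars ((L.length : Nat) : Int) ++ ['.'],
             ((L ++ [c]).length : Int)) := by
        unfold pvStepA
        rw [hcont, hnone]
        simp [PySem.Dict.getD_eq_get?_getD, PySem.Dict.get?_insert_self]
      rw [List.foldl_cons, hstep, ih (L ++ [c]) _ _ hinv']
      simp only [pvBody, hL', pvChunk, PySem.List.index?_append_singleton_self L c hmem]
      simp

-- dropping the trailing '.' of A's "<chunk>."-concatenation is exactly a '.'-join
lemma pvDropLast_join (ps : List (List Char)) :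
    ((ps.map (· ++ ['.'])).flatten).dropLast = PySem.Chars.join ['.'] ps := by
  induction ps with
  | nil => simp [PySem.Chars.join_nil]
  | cons p ps ih =>
    cases ps with
    | nil => simp [PySem.Chars.join_singleton]
    | cons q ps' =>
      rw [PySem.Chars.join_cons_cons]
      simp only [List.map_cons, List.flatten_cons] at ih ⊢
      rw [List.dropLast_append_of_ne_nil (by simp), ih]

-- pvDistStep is Python's set.add on a Char list
lemma pvAdd_eq (s : List Char) (c : Char) : PySem.Set.add s c = pvDistStep s c := by
  by_cases h : c ∈ s <;> simp [PySem.Set.add, pvDistStep, PySem.Set.contains, h]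

lemma pvFold_add_eq (l L : List Char) : l.foldl PySem.Set.add L = l.foldl pvDistStep L := by
  induction l generalizing L with
  | nil => rfl
  | cons c l ih => simp only [List.foldl_cons, pvAdd_eq, ih]

-- THE BRIDGE: the position of c in the ordered distinct-letter table equals the number of
-- distinct letters in the prefix of l before c's first occurrence
lemma pvIndex_ofList (l : List Char) (c : Char) (k : Nat)
    (hk : PySem.List.index? l c = some k) :
    PySem.List.index? (l.foldl pvDistStep []) c
      = some (PySem.Set.ofList (l.take k)).length := by
  obtain ⟨pre, suf, hsplit, hlen, hpre⟩ := (PySem.List.index?_eq_some_iff l c k).mp hk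
  have htake : l.take k = pre := by rw [hsplit, ← hlen, List.take_left]
  have hpreS : c ∉ PySem.Set.ofList pre := fun h => hpre ((PySem.List.mem_dedup pre c).mp h)
  -- unfold the fold across the split point
  have h1 : l.foldl pvDistStep [] = suf.foldl pvDistStep (PySem.Set.ofList pre ++ [c]) := by
    rw [hsplit, List.foldl_append, List.foldl_cons]
    congr 1
    rw [show pre.foldl pvDistStep [] = PySem.Set.ofList pre from
      (pvFold_add_eq pre []).symm.trans (PySem.Set.ofList_eq_foldl pre).symm]
    simp [pvDistStep, hpreS]
  obtain ⟨t, ht⟩ := pvDist_prefix suf (PySem.Set.ofList pre ++ [c])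
  rw [h1, ht, PySem.List.index?_append_of_mem t (show c ∈ PySem.Set.ofList pre ++ [c] by simp),
    PySem.List.index?_append_singleton_self _ c hpreS, htake]

-- ===== VERDICT (by name: the statement is the Claim_ definition above) =====
theorem get_word_pattern_spec : Claim_equal_get_word_pattern := by
  intro word _
  unfold Spec_get_word_pattern get_word_pattern get_word_pattern_alt
  apply String.ext
  have hA := pvFoldA ((PySem.Str.upper word).toList) [] PySem.Dict.empty []
    (by intro c
        rw [PySem.Dict.get?_empty, (PySem.List.index?_eq_none_iff [] c).mpr (by simp)]
        rfl)
  simp only [List.length_nil, Nat.cast_zero] at hA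
  rw [PySem.List.slice_to_neg_one, String.toList_ofList, hA, List.nil_append,
    pvBody_eq_flatten _ [], pvDropLast_join, PySem.Str.toList_join]
  have hdot : ".".toList = ['.'] := rfl
  rw [hdot, List.map_map]
  apply congrArg
  apply List.map_congr_left
  intro c hc
  obtain ⟨k, hk⟩ := Option.isSome_iff_exists.mp
    ((PySem.List.index?_isSome_iff _ c).mpr hc)
  rw [Function.comp_apply, PySem.Int.toList_toStr]
  unfold pvChunk
  rw [pvIndex_ofList _ c k hk, hk]
  rw [PySem.List.slice_to_natCast]
  rfl
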